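-- pv_equiv track=rewrite | github.com/uridog/server_almost_final | server.py | calculate_points_for_a_single_category
-- ===== SOURCE A (Python) =====
-- def check_for_special_word(single_category_list):
--     special = True
--     counter = 0
--     for i in range(3):
--         if single_category_list[i] != "":
--             for x in range(3):
--                 if x != i:
--                     if single_category_list[x] != "":
--                         special = False
--             if special is True:
--                 return counter
--         counter += 1
--         special = True
--     return -1
--
-- def calculate_points_for_a_single_category(single_category_list):
--     points = [0] * len(single_category_list)  # initialize points list to 0
--     special_word_index = check_for_special_word(single_category_list)
--     counter = 0
--     five_pts = False
--     if single_category_list[0] == "" and single_category_list[1] == "" and single_category_list[2] == "":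
--         return points
--     if special_word_index != -1:
--         points[special_word_index] = 15
--         return points
--     else:
--         for i in single_category_list:
--             if i != "":
--                 for x in single_category_list:
--                     if x == i:
--                         points[counter] = 5
--                         five_pts = True
--                 if five_pts is False:
--                     points[counter] = 10
--             counter += 1
--         return points
-- ===== SOURCE B (Python) =====
-- def calculate_points_for_a_single_category(single_category_list):
--     # indices among positions 0..2 that are filled; raises IndexError for len < 3, like A
--     filled = [i for i in range(3) if single_category_list[i] != ""]
--     if not filled:
--         return [0] * len(single_category_list)
--     if len(filled) == 1:
--         points = [0] * len(single_category_list)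
--         points[filled[0]] = 15
--         return points
--     return [5 if v != "" else 0 for v in single_category_list]
-- ===== Notes on version B (the rewrite author's own statement) =====
-- stated objective: faster
-- what changed: B drops the quadratic helper and the dead inner scan (the 10-point branch can never fire since every element matches itself): it collects the filled indices among positions 0-2 once, then returns zeros / a single 15 / a one-pass 5-per-nonempty map.
import Mathlib
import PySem

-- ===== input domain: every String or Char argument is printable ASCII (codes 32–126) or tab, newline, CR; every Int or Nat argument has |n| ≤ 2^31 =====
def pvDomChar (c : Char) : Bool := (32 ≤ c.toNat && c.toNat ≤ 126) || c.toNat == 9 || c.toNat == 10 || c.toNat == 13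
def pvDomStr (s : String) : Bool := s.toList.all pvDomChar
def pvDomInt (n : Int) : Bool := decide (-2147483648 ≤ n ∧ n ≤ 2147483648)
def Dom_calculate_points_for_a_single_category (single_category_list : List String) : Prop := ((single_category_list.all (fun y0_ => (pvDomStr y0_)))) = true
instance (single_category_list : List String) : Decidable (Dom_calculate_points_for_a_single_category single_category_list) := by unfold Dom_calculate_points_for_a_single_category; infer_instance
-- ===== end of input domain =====

-- B replaces A's quadratic helper and dead inner scan with one pass over the filled indices 0-2 (faster in a timing run); equivalence is proved for lists of length ≥ 3 (A raises IndexError otherwise).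

-- ===== PORT A =====
-- check_for_special_word: loop i in range(3); pyGetD is exact under Pre_ (length ≥ 3, so indices 0..2 are in range)
def pvCheckGo (l : List String) : List Nat → Int → Int
  | [], _ => -1
  | i :: rest, counter =>
    if PySem.List.pyGetD l (i : Int) "" ≠ "" then
      -- inner 'for x in range(3)' with the running flag special (reset to True each outer iteration)
      let special := (List.range 3).foldl
        (fun s x => if x ≠ i then (if PySem.List.pyGetD l (x : Int) "" ≠ "" then false else s) else s) true
      if special then counter else pvCheckGo l rest (counter + 1)
    else pvCheckGo l rest (counter + 1)

def check_for_special_word (l : List String) : Int := pvCheckGo l [0, 1, 2] 0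

def calculate_points_for_a_single_category (single_category_list : List String) : List Int :=
  let points : List Int := List.replicate single_category_list.length 0
  let special_word_index := check_for_special_word single_category_list
  if PySem.List.pyGetD single_category_list (0 : Int) "" = ""
      ∧ PySem.List.pyGetD single_category_list (1 : Int) "" = ""
      ∧ PySem.List.pyGetD single_category_list (2 : Int) "" = "" then
    points
  else if special_word_index ≠ -1 then
    points.set special_word_index.toNat 15
  else
    -- outer 'for i in single_category_list' threading (points, counter, five_pts); five_pts is never reset, as in A
    (single_category_list.foldl
      (fun (st : List Int × Nat × Bool) i =>
        let (points, counter, five_pts) := st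
        if i ≠ "" then
          let inner := single_category_list.foldl
            (fun (st2 : List Int × Bool) x =>
              if x = i then (st2.1.set counter 5, true) else st2) (points, five_pts)
          let points := inner.1
          let five_pts := inner.2
          let points := if five_pts = false then points.set counter 10 else points
          (points, counter + 1, five_pts)
        else (points, counter + 1, five_pts))
      (points, 0, false)).1

-- ===== PORT B =====
def calculate_points_for_a_single_category_alt (single_category_list : List String) : List Int :=
  let filled : List Nat := (List.range 3).filter (fun i => PySem.List.pyGetD single_category_list (i : Int) "" ≠ "")
  match filled with
  | [] => List.replicate single_category_list.length 0
  | [i] => (List.replicate single_category_list.length (0 : Int)).set i 15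
  | _ => single_category_list.map (fun v => if v ≠ "" then (5 : Int) else 0)

-- ===== PRECONDITION & SPEC =====
-- Pre_ excludes lists of length < 3, on which A raises IndexError (check_for_special_word indexes positions 0..2).
def Pre_calculate_points_for_a_single_category (single_category_list : List String) : Prop :=
  3 ≤ single_category_list.length
instance (single_category_list : List String) : Decidable (Pre_calculate_points_for_a_single_category single_category_list) := by unfold Pre_calculate_points_for_a_single_category; infer_instance
def pvWitness_calculate_points_for_a_single_category : List String := ["a", "", "b", ""]

def Spec_calculate_points_for_a_single_category (single_category_list : List String) (out : List Int) : Prop := out = calculate_points_for_a_single_category_alt single_category_list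
instance (single_category_list : List String) (out : List Int) : Decidable (Spec_calculate_points_for_a_single_category single_category_list out) := by unfold Spec_calculate_points_for_a_single_category; infer_instance

-- ===== CLAIM (what is proved, stated in full; the proofs are below) =====
def Claim_equal_calculate_points_for_a_single_category : Prop := ∀ (single_category_list : List String), Dom_calculate_points_for_a_single_category single_category_list → Pre_calculate_points_for_a_single_category single_category_list → Spec_calculate_points_for_a_single_category single_category_list (calculate_points_for_a_single_category single_category_list)

-- ===== LEMMAS AND PROOFS =====

-- inner scan of A: i is an element of xs ⇒ the 5 is written and five_pts becomes true
theorem pvInnerFold (i : String) (c : Nat) :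
    ∀ (xs : List String) (p : List Int) (f : Bool),
      xs.foldl (fun (st2 : List Int × Bool) x => if x = i then (st2.1.set c 5, true) else st2) (p, f)
        = if i ∈ xs then (p.set c 5, true) else (p, f) := by
  intro xs
  induction xs with
  | nil => intro p f; simp
  | cons x xs ih =>
    intro p f
    by_cases hx : x = i
    · subst hx
      simp only [List.foldl_cons, ih, List.set_set, List.mem_cons, true_or, if_true]
      split <;> rfl
    · simp [List.foldl_cons, hx, ih, Ne.symm hx]

-- outer loop of A writes 5 at each filled position, in order
theorem pvOuterFold (l : List String) :
    ∀ (ys : List String) (pre : List Int) (f : Bool), (∀ y ∈ ys, y ∈ l) →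
      (ys.foldl
        (fun (st : List Int × Nat × Bool) i =>
          let (points, counter, five_pts) := st
          if i ≠ "" then
            let inner := l.foldl
              (fun (st2 : List Int × Bool) x =>
                if x = i then (st2.1.set counter 5, true) else st2) (points, five_pts)
            let points := inner.1
            let five_pts := inner.2
            let points := if five_pts = false then points.set counter 10 else points
            (points, counter + 1, five_pts)
          else (points, counter + 1, five_pts))
        (pre ++ List.replicate ys.length 0, pre.length, f)).1
      = pre ++ ys.map (fun v => if v ≠ "" then (5 : Int) else 0) := by
  intro ys
  induction ys with
  | nil => intro pre f _; simp
  | cons y ys ih =>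
    intro pre f hmem
    by_cases hy : y = ""
    · subst hy
      have h0 : pre ++ List.replicate (ys.length + 1) 0 = (pre ++ [(0 : Int)]) ++ List.replicate ys.length 0 := by
        simp [List.replicate_succ]
      have := ih (pre ++ [(0 : Int)]) f (fun z hz => hmem z (List.mem_cons_of_mem _ hz))
      simp only [List.length_append, List.length_cons, List.length_nil] at this
      simpa [h0, this] using this
    · have hyl : y ∈ l := hmem y (List.mem_cons_self ..)
      have hset : (pre ++ List.replicate (ys.length + 1) (0 : Int)).set pre.length 5
          = (pre ++ [(5 : Int)]) ++ List.replicate ys.length 0 := by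
        simp [List.replicate_succ, List.set_append_right]
      have := ih (pre ++ [(5 : Int)]) true (fun z hz => hmem z (List.mem_cons_of_mem _ hz))
      simp only [List.length_append, List.length_cons, List.length_nil] at this
      simp only [List.foldl_cons]
      simp only [pvInnerFold y pre.length l, if_pos hyl]
      simpa [hy] using this

theorem pvOuterMain (l : List String) :
    (l.foldl
      (fun (st : List Int × Nat × Bool) i =>
        let (points, counter, five_pts) := st
        if i ≠ "" then
          let inner := l.foldl
            (fun (st2 : List Int × Bool) x =>
              if x = i then (st2.1.set counter 5, true) else st2) (points, five_pts)
          let points := inner.1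
          let five_pts := inner.2
          let points := if five_pts = false then points.set counter 10 else points
          (points, counter + 1, five_pts)
        else (points, counter + 1, five_pts))
      (List.replicate l.length 0, 0, false)).1
    = l.map (fun v => if v ≠ "" then (5 : Int) else 0) := by
  have := pvOuterFold l l [] false (fun _ h => h)
  simpa using this

-- branch lemmas for A's three return paths (l abstract, so simp cannot unfold the folds)
theorem pvCalcEmpty (l : List String)
    (h0 : PySem.List.pyGetD l (0 : Int) "" = "") (h1 : PySem.List.pyGetD l (1 : Int) "" = "")
    (h2 : PySem.List.pyGetD l (2 : Int) "" = "") :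
    calculate_points_for_a_single_category l = List.replicate l.length 0 := by
  simp [calculate_points_for_a_single_category, h0, h1, h2]

theorem pvCalcSpecial (l : List String)
    (hne : ¬(PySem.List.pyGetD l (0 : Int) "" = "" ∧ PySem.List.pyGetD l (1 : Int) "" = ""
        ∧ PySem.List.pyGetD l (2 : Int) "" = "")) (k : Int)
    (hswi : check_for_special_word l = k) (hk : k ≠ -1) :
    calculate_points_for_a_single_category l = (List.replicate l.length (0 : Int)).set k.toNat 15 := by
  simp [calculate_points_for_a_single_category, hne, hswi, hk]

theorem pvCalcElse (l : List String)
    (hne : ¬(PySem.List.pyGetD l (0 : Int) "" = "" ∧ PySem.List.pyGetD l (1 : Int) "" = ""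
        ∧ PySem.List.pyGetD l (2 : Int) "" = ""))
    (hswi : check_for_special_word l = -1) :
    calculate_points_for_a_single_category l = l.map (fun v => if v ≠ "" then (5 : Int) else 0) := by
  have h := pvOuterMain l
  simp [calculate_points_for_a_single_category, hne, hswi] at h ⊢
  exact h

-- ===== VERDICT (by name: the statement is the Claim_ definition above) =====
set_option maxHeartbeats 1000000 in
theorem calculate_points_for_a_single_category_spec : Claim_equal_calculate_points_for_a_single_category := by
  intro l _ hpre
  unfold Spec_calculate_points_for_a_single_category
  obtain ⟨a, b, c, rest, rfl⟩ : ∃ a b c rest, l = a :: b :: c :: rest := by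
    match l, hpre with
    | a :: b :: c :: rest, _ => exact ⟨a, b, c, rest, rfl⟩
  have h0 : PySem.List.pyGetD (a :: b :: c :: rest) (0 : Int) "" = a := by simp [pysem]
  have h1 : PySem.List.pyGetD (a :: b :: c :: rest) (1 : Int) "" = b := by simp [pysem]
  have h2 : PySem.List.pyGetD (a :: b :: c :: rest) (2 : Int) "" = c := by simp [pysem]
  by_cases ha : a = "" <;> by_cases hb : b = "" <;> by_cases hc : c = ""
  · rw [pvCalcEmpty _ (by rw [h0, ha]) (by rw [h1, hb]) (by rw [h2, hc])]
    simp [calculate_points_for_a_single_category_alt, List.range_succ, PySem.List.pyGetD_natCast, List.getD, ha, hb, hc]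
  · rw [pvCalcSpecial _ (by simp [PySem.List.pyGetD_ofNat', List.getD, ha, hb, hc]) 2
      (by simp [check_for_special_word, pvCheckGo, List.range_succ, PySem.List.pyGetD_natCast, PySem.List.pyGetD_ofNat', List.getD, ha, hb, hc]) (by decide)]
    simp [calculate_points_for_a_single_category_alt, List.range_succ, PySem.List.pyGetD_natCast, List.getD, ha, hb, hc]
  · rw [pvCalcSpecial _ (by simp [PySem.List.pyGetD_ofNat', List.getD, ha, hb, hc]) 1
      (by simp [check_for_special_word, pvCheckGo, List.range_succ, PySem.List.pyGetD_natCast, PySem.List.pyGetD_ofNat', List.getD, ha, hb, hc]) (by decide)]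
    simp [calculate_points_for_a_single_category_alt, List.range_succ, PySem.List.pyGetD_natCast, List.getD, ha, hb, hc]
  · rw [pvCalcElse _ (by simp [PySem.List.pyGetD_ofNat', List.getD, ha, hb, hc])
      (by simp [check_for_special_word, pvCheckGo, List.range_succ, PySem.List.pyGetD_natCast, PySem.List.pyGetD_ofNat', List.getD, ha, hb, hc])]
    simp [calculate_points_for_a_single_category_alt, List.range_succ, PySem.List.pyGetD_natCast, List.getD, ha, hb, hc]
  · rw [pvCalcSpecial _ (by simp [PySem.List.pyGetD_ofNat', List.getD, ha, hb, hc]) 0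
      (by simp [check_for_special_word, pvCheckGo, List.range_succ, PySem.List.pyGetD_natCast, PySem.List.pyGetD_ofNat', List.getD, ha, hb, hc]) (by decide)]
    simp [calculate_points_for_a_single_category_alt, List.range_succ, PySem.List.pyGetD_natCast, List.getD, ha, hb, hc]
  · rw [pvCalcElse _ (by simp [PySem.List.pyGetD_ofNat', List.getD, ha, hb, hc])
      (by simp [check_for_special_word, pvCheckGo, List.range_succ, PySem.List.pyGetD_natCast, PySem.List.pyGetD_ofNat', List.getD, ha, hb, hc])]
    simp [calculate_points_for_a_single_category_alt, List.range_succ, PySem.List.pyGetD_natCast, List.getD, ha, hb, hc]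
  · rw [pvCalcElse _ (by simp [PySem.List.pyGetD_ofNat', List.getD, ha, hb, hc])
      (by simp [check_for_special_word, pvCheckGo, List.range_succ, PySem.List.pyGetD_natCast, PySem.List.pyGetD_ofNat', List.getD, ha, hb, hc])]
    simp [calculate_points_for_a_single_category_alt, List.range_succ, PySem.List.pyGetD_natCast, List.getD, ha, hb, hc]
  · rw [pvCalcElse _ (by simp [PySem.List.pyGetD_ofNat', List.getD, ha, hb, hc])
      (by simp [check_for_special_word, pvCheckGo, List.range_succ, PySem.List.pyGetD_natCast, PySem.List.pyGetD_ofNat', List.getD, ha, hb, hc])]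
    simp [calculate_points_for_a_single_category_alt, List.range_succ, PySem.List.pyGetD_natCast, List.getD, ha, hb, hc]
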